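-- pv_equiv track=rewrite | github.com/Exital/IntroToAi | Projects/shani's project/ID3.py | update_values
-- ===== SOURCE A (Python) =====
-- def update_values(val_feature, detection, divider):
--     """
--     function to update values of size_bigger, bigger_positive, size_smaller, smaller_positive
--     :param val_feature: The values of features
--     :param detection: The data from diagnosis's column
--     :param divider: divider from threshold_list
--     :return: size_bigger, bigger_positive, size_smaller, smaller_positive
--     :rtype: tuple
--     """
--     size_bigger, bigger_positive, size_smaller, smaller_positive = 0, 0, 0, 0
--     for i in range(len(val_feature)):
--         if val_feature[i] <= divider:
--             size_smaller += 1
--             if detection[i] == "M":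
--                 smaller_positive += 1
--         else:
--             size_bigger += 1
--             if detection[i] == "M":
--                 bigger_positive += 1
--
--     return size_bigger, bigger_positive, size_smaller, smaller_positive
-- ===== SOURCE B (Python) =====
-- def update_values(val_feature, detection, divider):
--     """Partition-then-count: pair each value with its label, split the labels
--     into the two sides of the divider, then measure each side with len/count."""
--     pairs = list(zip(val_feature, detection))
--     smaller = [d for v, d in pairs if v <= divider]
--     bigger = [d for v, d in pairs if v > divider]
--     return len(bigger), bigger.count("M"), len(smaller), smaller.count("M")
-- ===== Notes on version B (the rewrite author's own statement) =====
-- stated objective: alternative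
-- what changed: B replaces A's indexed loop with two branch counters by a zip-partition: it pairs values with labels, builds the two label lists by comprehension filters, and reads the four results off with len and list.count.
-- outside the precondition, e.g. on update_values([1, 2], ['M'], 0): A raises IndexError, B returns (1, 1, 0, 0)
import Mathlib
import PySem

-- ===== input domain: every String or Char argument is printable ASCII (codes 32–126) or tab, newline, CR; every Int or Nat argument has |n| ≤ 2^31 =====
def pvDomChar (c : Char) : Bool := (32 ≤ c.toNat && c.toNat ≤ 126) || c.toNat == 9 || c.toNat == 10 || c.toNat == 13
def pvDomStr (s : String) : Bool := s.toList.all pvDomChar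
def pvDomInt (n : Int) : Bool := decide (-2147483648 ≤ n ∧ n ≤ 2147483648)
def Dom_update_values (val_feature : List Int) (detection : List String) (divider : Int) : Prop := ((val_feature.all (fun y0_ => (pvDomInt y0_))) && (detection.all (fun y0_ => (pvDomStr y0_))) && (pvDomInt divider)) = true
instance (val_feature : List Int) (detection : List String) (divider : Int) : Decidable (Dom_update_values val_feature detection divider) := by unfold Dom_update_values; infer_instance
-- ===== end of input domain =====

-- B replaces A's indexed two-branch counting loop with a zip-partition: pair values with
-- labels, filter the labels into the two sides, then read the results off with len/count.

-- ===== PORT A =====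
-- Out-of-range detection[i] (an IndexError in Python) is read through .getD ""; Pre_ excludes those inputs.
def pvStepA (val_feature : List Int) (detection : List String) (divider : Int)
    (st : Int × Int × Int × Int) (i : Int) : Int × Int × Int × Int :=
  let (size_bigger, bigger_positive, size_smaller, smaller_positive) := st
  if (PySem.List.pyGet? val_feature i).getD 0 ≤ divider then
    (size_bigger, bigger_positive, size_smaller + 1,
     if (PySem.List.pyGet? detection i).getD "" == "M" then smaller_positive + 1 else smaller_positive)
  else
    (size_bigger + 1,
     if (PySem.List.pyGet? detection i).getD "" == "M" then bigger_positive + 1 else bigger_positive,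
     size_smaller, smaller_positive)

def update_values (val_feature : List Int) (detection : List String) (divider : Int) : Int × Int × Int × Int :=
  (PySem.List.pyRange 0 val_feature.length 1).foldl (pvStepA val_feature detection divider) (0, 0, 0, 0)

-- ===== PORT B =====
def update_values_alt (val_feature : List Int) (detection : List String) (divider : Int) : Int × Int × Int × Int :=
  let pairs := val_feature.zip detection
  let smaller := (pairs.filter (fun p => p.1 ≤ divider)).map Prod.snd
  let bigger := (pairs.filter (fun p => divider < p.1)).map Prod.snd
  ((bigger.length : Int), (PySem.List.count bigger "M" : Int),
   (smaller.length : Int), (PySem.List.count smaller "M" : Int))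

-- ===== PRECONDITION & SPEC =====
-- A raises IndexError exactly when detection is shorter than val_feature; Pre_ excludes those inputs.
def Pre_update_values (val_feature : List Int) (detection : List String) (divider : Int) : Prop :=
  val_feature.length ≤ detection.length
instance (val_feature : List Int) (detection : List String) (divider : Int) : Decidable (Pre_update_values val_feature detection divider) := by unfold Pre_update_values; infer_instance
def pvWitness_update_values : List Int × List String × Int := ([1, 4, 2], ["M", "B", "M"], 2)

def Spec_update_values (val_feature : List Int) (detection : List String) (divider : Int) (out : Int × Int × Int × Int) : Prop := out = update_values_alt val_feature detection divider
instance (val_feature : List Int) (detection : List String) (divider : Int) (out : Int × Int × Int × Int) : Decidable (Spec_update_values val_feature detection divider out) := by unfold Spec_update_values; infer_instance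

-- ===== CLAIM (what is proved, stated in full; the proofs are below) =====
def Claim_equal_update_values : Prop := ∀ (val_feature : List Int) (detection : List String) (divider : Int), Dom_update_values val_feature detection divider → Pre_update_values val_feature detection divider → Spec_update_values val_feature detection divider (update_values val_feature detection divider)

-- ===== LEMMAS AND PROOFS =====

-- 0/1-count of indices satisfying a predicate
def pvCnt (p : Int → Bool) : List Int → Int
  | [] => 0
  | i :: l => (if p i then 1 else 0) + pvCnt p l

theorem pvFoldA_eq (val_feature : List Int) (detection : List String) (divider : Int)
    (l : List Int) (sb bp ss sp : Int) :
    l.foldl (pvStepA val_feature detection divider) (sb, bp, ss, sp) =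
      (sb + pvCnt (fun i => !((PySem.List.pyGet? val_feature i).getD 0 ≤ divider : Bool)) l,
       bp + pvCnt (fun i => !((PySem.List.pyGet? val_feature i).getD 0 ≤ divider : Bool)
                    && ((PySem.List.pyGet? detection i).getD "" == "M")) l,
       ss + pvCnt (fun i => ((PySem.List.pyGet? val_feature i).getD 0 ≤ divider : Bool)) l,
       sp + pvCnt (fun i => ((PySem.List.pyGet? val_feature i).getD 0 ≤ divider : Bool)
                    && ((PySem.List.pyGet? detection i).getD "" == "M")) l) := by
  induction l generalizing sb bp ss sp with
  | nil => simp [pvCnt]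
  | cons i l ih =>
    simp only [List.foldl_cons, pvStepA, pvCnt]
    by_cases hA : ((PySem.List.pyGet? val_feature i).getD 0 ≤ divider)
    · by_cases hM : ((PySem.List.pyGet? detection i).getD "" == "M") = true
      · simp [hA, hM, ih, Prod.mk.injEq] <;> omega
      · simp [hA, hM, ih, Prod.mk.injEq] <;> omega
    · by_cases hM : ((PySem.List.pyGet? detection i).getD "" == "M") = true
      · simp [hA, hM, ih, Prod.mk.injEq] <;> omega
      · simp [hA, hM, ih, Prod.mk.injEq] <;> omega

-- an index-count over pyRange k..len(V) is a pair-count over the zipped suffixes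
theorem pvCnt_pyRange_zip (V : List Int) (D : List String) (p : Int → Bool)
    (q : Int × String → Bool)
    (hpq : ∀ i : Int, p i = q ((PySem.List.pyGet? V i).getD 0, (PySem.List.pyGet? D i).getD ""))
    (hVD : V.length ≤ D.length) :
    ∀ (n k : Nat), k ≤ V.length → V.length - k = n →
    pvCnt p (PySem.List.pyRange k V.length 1)
      = (((V.drop k).zip (D.drop k)).countP q : Int) := by
  intro n
  induction n with
  | zero =>
    intro k hk h0
    have hk' : k = V.length := by omega
    subst hk'
    rw [PySem.List.pyRange_one_eq_nil (by omega)]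
    rw [List.drop_of_length_le (le_refl _)]
    simp [pvCnt]
  | succ n ih =>
    intro k hk hn
    have hklt : k < V.length := by omega
    have hkD : k < D.length := by omega
    rw [PySem.List.pyRange_one_cons (by exact_mod_cast hklt)]
    simp only [pvCnt]
    have h1 : ((k : Int) + 1) = ((k + 1 : Nat) : Int) := by push_cast; ring
    rw [h1, ih (k + 1) (by omega) (by omega)]
    have hV : V.drop k = V[k] :: V.drop (k + 1) := List.drop_eq_getElem_cons hklt
    have hD : D.drop k = D[k] :: D.drop (k + 1) := List.drop_eq_getElem_cons hkD
    rw [hV, hD, hpq (k : Int)]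
    simp only [PySem.List.pyGet?_natCast, List.getElem?_eq_getElem hklt,
      List.getElem?_eq_getElem hkD, Option.getD_some, List.zip_cons_cons, List.countP_cons]
    by_cases hq : q (V[k], D[k]) = true <;> simp [hq] <;> push_cast <;> ring

-- the k = 0 corollary used four times below
theorem pvCnt_zip0 (V : List Int) (D : List String) (p : Int → Bool)
    (q : Int × String → Bool)
    (hpq : ∀ i : Int, p i = q ((PySem.List.pyGet? V i).getD 0, (PySem.List.pyGet? D i).getD ""))
    (hVD : V.length ≤ D.length) :
    pvCnt p (PySem.List.pyRange 0 V.length 1) = ((V.zip D).countP q : Int) := by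
  have h := pvCnt_pyRange_zip V D p q hpq hVD V.length 0 (by omega) rfl
  simpa using h

-- ===== VERDICT (by name: the statement is the Claim_ definition above) =====
theorem update_values_spec : Claim_equal_update_values := by
  intro val_feature detection divider _ hpre
  unfold Spec_update_values update_values update_values_alt
  rw [pvFoldA_eq]
  rw [pvCnt_zip0 val_feature detection _ (fun p => !(p.1 ≤ divider : Bool)) (fun i => rfl) hpre]
  rw [pvCnt_zip0 val_feature detection _
      (fun p => !(p.1 ≤ divider : Bool) && (p.2 == "M")) (fun i => rfl) hpre]
  rw [pvCnt_zip0 val_feature detection _ (fun p => (p.1 ≤ divider : Bool)) (fun i => rfl) hpre]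
  rw [pvCnt_zip0 val_feature detection _
      (fun p => (p.1 ≤ divider : Bool) && (p.2 == "M")) (fun i => rfl) hpre]
  refine Prod.ext ?_ (Prod.ext ?_ (Prod.ext ?_ ?_)) <;>
    simp only [PySem.List.count_eq, List.count, List.length_map,
      ← List.countP_eq_length_filter, List.countP_map, List.countP_filter,
      zero_add, Nat.cast_inj] <;>
  · apply List.countP_congr
    intro p _
    by_cases h : p.1 ≤ divider <;> simp [h, Bool.and_comm] <;> omega
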